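-- pv_equiv track=rewrite | github.com/Sathwik57/temp | Tetris/utils.py | create_grid
-- ===== SOURCE A (Python) =====
-- def create_grid(filled={}):
--     grid = [[(0, 0, 0) for _ in range(10)] for i in range(20)]
--
--     for i in range(len(grid)):
--         for j in range(len(grid[i])):
--             if (j, i) in filled:
--                 c = filled[(j, i)]
--                 grid[i][j] = c
--     return grid
-- ===== SOURCE B (Python) =====
-- def create_grid(filled={}):
--     grid = [[(0, 0, 0) for _ in range(10)] for _ in range(20)]
--     for (j, i), c in filled.items():
--         if 0 <= i < 20 and 0 <= j < 10:
--             grid[i][j] = c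
--     return grid
-- ===== Notes on version B (the rewrite author's own statement) =====
-- stated objective: alternative
-- what changed: Instead of scanning all 200 grid cells and testing each coordinate against the dict, B builds the same default grid and makes one pass over filled.items(), writing each in-range entry directly into its cell.
import Mathlib
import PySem

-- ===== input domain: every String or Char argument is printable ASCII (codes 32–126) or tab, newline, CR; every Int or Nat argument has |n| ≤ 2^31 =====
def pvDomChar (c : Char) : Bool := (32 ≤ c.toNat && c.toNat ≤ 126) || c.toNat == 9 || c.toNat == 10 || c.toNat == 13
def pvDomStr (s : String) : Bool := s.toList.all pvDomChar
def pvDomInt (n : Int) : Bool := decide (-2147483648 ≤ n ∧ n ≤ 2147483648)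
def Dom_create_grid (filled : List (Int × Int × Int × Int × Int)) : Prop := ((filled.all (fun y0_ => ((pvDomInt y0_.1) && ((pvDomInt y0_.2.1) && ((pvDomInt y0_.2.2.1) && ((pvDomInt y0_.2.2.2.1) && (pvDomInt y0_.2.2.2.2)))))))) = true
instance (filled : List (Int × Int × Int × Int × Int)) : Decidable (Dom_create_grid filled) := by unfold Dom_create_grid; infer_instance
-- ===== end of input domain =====

-- B walks the sparse dict once instead of scanning all 200 cells with a membership
-- test per cell; same return value (no speed claim).

-- ===== PORT A =====
-- dict lookup '(j, i) in filled' / 'filled[(j, i)]' on the association list: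
-- first match on the key (j, i), none = key absent (exact for a dict's list representation)
def lookA (filled : List (Int × Int × Int × Int × Int)) (j i : Int) : Option (Int × Int × Int) :=
  match filled with
  | [] => none
  | (a, b, c1, c2, c3) :: t => if a = j ∧ b = i then some (c1, c2, c3) else lookA t j i

def create_grid (filled : List (Int × Int × Int × Int × Int)) : List (List (Int × Int × Int)) :=
  let grid := (PySem.List.pyRange 0 20 1).map
    (fun _ => (PySem.List.pyRange 0 10 1).map (fun _ => ((0:Int), (0:Int), (0:Int))))
  (PySem.List.pyRange 0 (grid.length : Int) 1).foldl
    (fun g i =>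
      (PySem.List.pyRange 0 ((PySem.List.pyGetD g i []).length : Int) 1).foldl
        (fun g2 j =>
          match lookA filled j i with
          | some c => PySem.List.pySetD g2 i (PySem.List.pySetD (PySem.List.pyGetD g2 i []) j c)
          | none => g2)
        g)
    grid

-- ===== PORT B =====
def create_grid_alt (filled : List (Int × Int × Int × Int × Int)) : List (List (Int × Int × Int)) :=
  let grid := (PySem.List.pyRange 0 20 1).map
    (fun _ => (PySem.List.pyRange 0 10 1).map (fun _ => ((0:Int), (0:Int), (0:Int))))
  filled.foldl
    (fun g x =>
      if 0 ≤ x.2.1 ∧ x.2.1 < 20 ∧ 0 ≤ x.1 ∧ x.1 < 10 then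
        PySem.List.pySetD g x.2.1
          (PySem.List.pySetD (PySem.List.pyGetD g x.2.1 []) x.1 (x.2.2.1, x.2.2.2.1, x.2.2.2.2))
      else g)
    grid

-- ===== PRECONDITION & SPEC =====
-- Pre_ excludes association lists with duplicate (j, i) keys: a Python dict cannot contain
-- them (no dict-typed input is excluded), so such lists are an ambiguous representation of
-- the dict (first vs last value is anybody's choice).
def Pre_create_grid (filled : List (Int × Int × Int × Int × Int)) : Prop :=
  (filled.map (fun x => (x.1, x.2.1))).Nodup
instance (filled : List (Int × Int × Int × Int × Int)) : Decidable (Pre_create_grid filled) := by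
  unfold Pre_create_grid; infer_instance
def pvWitness_create_grid : (List (Int × Int × Int × Int × Int)) :=
  [(0, 0, 255, 0, 0), (3, 5, 0, 255, 0), (-1, 30, 9, 9, 9)]

def Spec_create_grid (filled : List (Int × Int × Int × Int × Int)) (out : List (List (Int × Int × Int))) : Prop := out = create_grid_alt filled
instance (filled : List (Int × Int × Int × Int × Int)) (out : List (List (Int × Int × Int))) : Decidable (Spec_create_grid filled out) := by unfold Spec_create_grid; infer_instance

-- ===== CLAIM (what is proved, stated in full; the proofs are below) =====
def Claim_equal_create_grid : Prop := ∀ (filled : List (Int × Int × Int × Int × Int)), Dom_create_grid filled → Pre_create_grid filled → Spec_create_grid filled (create_grid filled)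

-- ===== LEMMAS AND PROOFS =====

-- default cell and row/grid shapes
def zC : Int × Int × Int := (0, 0, 0)

def grid0 : List (List (Int × Int × Int)) := List.replicate 20 (List.replicate 10 zC)

theorem grid0_eq : ((PySem.List.pyRange 0 20 1).map
    (fun _ => (PySem.List.pyRange 0 10 1).map (fun _ => ((0:Int), (0:Int), (0:Int))))) = grid0 := by
  decide

-- the inner-row update A performs for one cell, on the row alone
def rowStep (filled : List (Int × Int × Int × Int × Int)) (i : Int)
    (r : List (Int × Int × Int)) (j : Int) : List (Int × Int × Int) :=
  match lookA filled j i with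
  | some c => PySem.List.pySetD r j c
  | none => r

-- A's whole-grid step for one cell
def stepA (filled : List (Int × Int × Int × Int × Int))
    (g : List (List (Int × Int × Int))) (i j : Int) : List (List (Int × Int × Int)) :=
  match lookA filled j i with
  | some c => PySem.List.pySetD g i (PySem.List.pySetD (PySem.List.pyGetD g i []) j c)
  | none => g

-- B's step
def stepB (g : List (List (Int × Int × Int))) (x : Int × Int × Int × Int × Int) :
    List (List (Int × Int × Int)) :=
  if 0 ≤ x.2.1 ∧ x.2.1 < 20 ∧ 0 ≤ x.1 ∧ x.1 < 10 then
    PySem.List.pySetD g x.2.1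
      (PySem.List.pySetD (PySem.List.pyGetD g x.2.1 []) x.1 (x.2.2.1, x.2.2.2.1, x.2.2.2.2))
  else g

theorem lookA_eq_none (filled : List (Int × Int × Int × Int × Int)) (j i : Int)
    (h : (j, i) ∉ filled.map (fun x => (x.1, x.2.1))) : lookA filled j i = none := by
  induction filled with
  | nil => rfl
  | cons x t ih =>
    obtain ⟨a, b, c1, c2, c3⟩ := x
    simp only [List.map_cons, List.mem_cons] at h
    push Not at h
    simp only [lookA]
    rw [if_neg, ih h.2]
    rintro ⟨rfl, rfl⟩
    exact h.1 rfl

theorem row_len (filled : List (Int × Int × Int × Int × Int)) (i : Int) (js : List Int)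
    (r : List (Int × Int × Int)) : (js.foldl (rowStep filled i) r).length = r.length := by
  induction js generalizing r with
  | nil => rfl
  | cons j js ih =>
    rw [List.foldl_cons, ih]
    unfold rowStep
    cases lookA filled j i with
    | none => rfl
    | some c => simp [PySem.List.length_pySetD]

theorem row_cells (filled : List (Int × Int × Int × Int × Int)) (i : Int) (js : List Int)
    (hnd : js.Nodup) (hpos : ∀ j ∈ js, 0 ≤ j) (r : List (Int × Int × Int)) (k : Nat)
    (hk : k < r.length) :
    (js.foldl (rowStep filled i) r).getD k zC =
      if (k : Int) ∈ js then ((lookA filled k i).getD (r.getD k zC)) else r.getD k zC := by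
  induction js generalizing r with
  | nil => simp
  | cons j js ih =>
    obtain ⟨hj, hnd⟩ := List.nodup_cons.mp hnd
    have hj0 : 0 ≤ j := hpos j (List.mem_cons_self ..)
    have hpos' : ∀ x ∈ js, 0 ≤ x := fun x hx => hpos x (List.mem_cons_of_mem _ hx)
    rw [List.foldl_cons]
    rcases hl : lookA filled j i with _ | c
    · rw [show rowStep filled i r j = r by unfold rowStep; rw [hl]]
      rw [ih hnd hpos' r hk]
      by_cases hkj : (k : Int) = j
      · have hkjs : (k : Int) ∉ js := hkj ▸ hj
        rw [← hkj] at hl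
        rw [if_neg hkjs, if_pos (show (k : Int) ∈ j :: js by rw [hkj]; exact List.mem_cons_self ..), hl]
        rfl
      · simp only [List.mem_cons, hkj, false_or]
    · rw [show rowStep filled i r j = r.set j.toNat c by
        unfold rowStep; rw [hl]; exact PySem.List.pySetD_of_nonneg _ _ hj0]
      rw [ih hnd hpos' _ (by simpa using hk)]
      by_cases hkj : (k : Int) = j
      · have hkj' : j.toNat = k := by omega
        have hkjs : (k : Int) ∉ js := hkj ▸ hj
        rw [← hkj] at hl
        rw [if_neg hkjs, if_pos (show (k : Int) ∈ j :: js by rw [hkj]; exact List.mem_cons_self ..), hl]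
        rw [hkj']
        simp [List.getD_eq_getElem?_getD, List.getElem?_set_self hk]
      · have hkj' : j.toNat ≠ k := by omega
        have : (r.set j.toNat c).getD k zC = r.getD k zC := by
          simp [List.getD_eq_getElem?_getD, List.getElem?_set_ne hkj']
        simp only [this, List.mem_cons, hkj, false_or]

theorem inner_eq (filled : List (Int × Int × Int × Int × Int)) (i : Int) (hi : 0 ≤ i)
    (js : List Int) (g : List (List (Int × Int × Int))) (hlen : i.toNat < g.length) :
    js.foldl (fun g2 j => stepA filled g2 i j) g =
      g.set i.toNat (js.foldl (rowStep filled i) (PySem.List.pyGetD g i [])) := by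
  have hilt : i < (g.length : Int) := by omega
  induction js generalizing g with
  | nil =>
    simp only [List.foldl_nil]
    rw [PySem.List.pyGetD_eq_getElem g [] hi hilt, List.set_getElem_self hlen]
  | cons j js ih =>
    rw [List.foldl_cons, List.foldl_cons]
    rcases hl : lookA filled j i with _ | c
    · rw [show stepA filled g i j = g by unfold stepA; rw [hl],
        show rowStep filled i (PySem.List.pyGetD g i []) j = PySem.List.pyGetD g i [] by
          unfold rowStep; rw [hl]]
      exact ih g hlen hilt
    · have h1 : stepA filled g i j =
          g.set i.toNat (PySem.List.pySetD (PySem.List.pyGetD g i []) j c) := by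
        unfold stepA; rw [hl]; exact PySem.List.pySetD_of_nonneg _ _ hi
      have h2 : rowStep filled i (PySem.List.pyGetD g i []) j =
          PySem.List.pySetD (PySem.List.pyGetD g i []) j c := by
        unfold rowStep; rw [hl]
      rw [h1, h2, ih _ (by simpa using hlen) (by simpa using hilt)]
      rw [List.set_set]
      congr 1
      rw [PySem.List.pyGetD_eq_getElem _ [] hi (by simpa using hilt),
        List.getElem_set_self]

theorem outer_len (filled : List (Int × Int × Int × Int × Int)) (is : List Int)
    (g : List (List (Int × Int × Int))) :
    (is.foldl (fun g i => g.set i.toNat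
      ((PySem.List.pyRange 0 ((PySem.List.pyGetD g i []).length : Int) 1).foldl
        (rowStep filled i) (PySem.List.pyGetD g i []))) g).length = g.length := by
  induction is generalizing g with
  | nil => rfl
  | cons i is ih => rw [List.foldl_cons, ih, List.length_set]

theorem outer_eq (filled : List (Int × Int × Int × Int × Int)) (is : List Int)
    (g : List (List (Int × Int × Int))) (h : ∀ i ∈ is, 0 ≤ i ∧ i.toNat < g.length) :
    is.foldl (fun g i =>
      (PySem.List.pyRange 0 ((PySem.List.pyGetD g i []).length : Int) 1).foldl
        (fun g2 j => stepA filled g2 i j) g) g =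
    is.foldl (fun g i => g.set i.toNat
      ((PySem.List.pyRange 0 ((PySem.List.pyGetD g i []).length : Int) 1).foldl
        (rowStep filled i) (PySem.List.pyGetD g i []))) g := by
  induction is generalizing g with
  | nil => rfl
  | cons i is ih =>
    obtain ⟨hi0, hilen⟩ := h i (List.mem_cons_self ..)
    rw [List.foldl_cons, List.foldl_cons, inner_eq filled i hi0 _ g hilen]
    exact ih _ (fun x hx => by
      simpa using h x (List.mem_cons_of_mem _ hx))

theorem outer_cells (filled : List (Int × Int × Int × Int × Int)) (is : List Int)
    (hnd : is.Nodup) (g : List (List (Int × Int × Int)))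
    (h : ∀ i ∈ is, 0 ≤ i ∧ i.toNat < g.length) (a : Nat) (ha : a < g.length) :
    (is.foldl (fun g i => g.set i.toNat
      ((PySem.List.pyRange 0 ((PySem.List.pyGetD g i []).length : Int) 1).foldl
        (rowStep filled i) (PySem.List.pyGetD g i []))) g).getD a [] =
    if (a : Int) ∈ is then
      (PySem.List.pyRange 0 ((g.getD a []).length : Int) 1).foldl
        (rowStep filled a) (g.getD a [])
    else g.getD a [] := by
  induction is generalizing g with
  | nil => simp
  | cons i is ih =>
    obtain ⟨hi, hnd⟩ := List.nodup_cons.mp hnd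
    obtain ⟨hi0, hilen⟩ := h i (List.mem_cons_self ..)
    have h' : ∀ x ∈ is, 0 ≤ x ∧ x.toNat < (g.set i.toNat
        ((PySem.List.pyRange 0 ((PySem.List.pyGetD g i []).length : Int) 1).foldl
          (rowStep filled i) (PySem.List.pyGetD g i []))).length := fun x hx => by
      simpa using h x (List.mem_cons_of_mem _ hx)
    rw [List.foldl_cons, ih hnd _ h' (by simpa using ha)]
    by_cases hai : (a : Int) = i
    · subst hai
      simp only [Int.toNat_natCast] at *
      rw [if_neg hi, if_pos (List.mem_cons_self ..),
        List.getD_eq_getElem?_getD, List.getElem?_set_self ha,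
        PySem.List.pyGetD_eq_getElem g [] hi0 (by omega)]
      simp [List.getD_eq_getElem?_getD, List.getElem?_eq_getElem ha]
    · have hai' : i.toNat ≠ a := by omega
      rw [List.getD_eq_getElem?_getD, List.getElem?_set_ne hai', ← List.getD_eq_getElem?_getD]
      simp only [List.mem_cons, hai, false_or]

theorem stepB_shape (g : List (List (Int × Int × Int))) (x : Int × Int × Int × Int × Int)
    (hg : g.length = 20) (hr : ∀ r ∈ g, r.length = 10) :
    (stepB g x).length = 20 ∧ ∀ r ∈ stepB g x, r.length = 10 := by
  unfold stepB
  split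
  · rename_i hc
    rw [PySem.List.pySetD_of_nonneg _ _ hc.1]
    refine ⟨by simpa using hg, fun r hrm => ?_⟩
    rcases List.mem_or_eq_of_mem_set hrm with hm | rfl
    · exact hr r hm
    · rw [PySem.List.pySetD_of_nonneg _ _ hc.2.2.1, List.length_set]
      refine hr _ ?_
      rw [PySem.List.pyGetD_eq_getElem g [] hc.1 (by omega)]
      exact List.getElem_mem _
  · exact ⟨hg, hr⟩

theorem B_shape (filled : List (Int × Int × Int × Int × Int))
    (g : List (List (Int × Int × Int))) (hg : g.length = 20)
    (hr : ∀ r ∈ g, r.length = 10) :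
    (filled.foldl stepB g).length = 20 ∧ ∀ r ∈ filled.foldl stepB g, r.length = 10 := by
  induction filled generalizing g with
  | nil => exact ⟨hg, hr⟩
  | cons x t ih =>
    rw [List.foldl_cons]
    obtain ⟨h1, h2⟩ := stepB_shape g x hg hr
    exact ih _ h1 h2

theorem B_cells (filled : List (Int × Int × Int × Int × Int))
    (hnd : (filled.map (fun x => (x.1, x.2.1))).Nodup)
    (g : List (List (Int × Int × Int))) (hg : g.length = 20)
    (hr : ∀ r ∈ g, r.length = 10)
    (a b : Nat) (ha : a < 20) (hb : b < 10) :
    ((filled.foldl stepB g).getD a []).getD b zC =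
      (lookA filled b a).getD ((g.getD a []).getD b zC) := by
  induction filled generalizing g with
  | nil => rfl
  | cons x t ih =>
    obtain ⟨j', i', c1, c2, c3⟩ := x
    simp only [List.map_cons, List.nodup_cons] at hnd
    obtain ⟨hknotin, hnd⟩ := hnd
    obtain ⟨hlen', hrows'⟩ := stepB_shape g (j', i', c1, c2, c3) hg hr
    rw [List.foldl_cons, ih hnd _ hlen' hrows']
    simp only [lookA]
    by_cases hkey : j' = (b : Int) ∧ i' = (a : Int)
    · obtain ⟨rfl, rfl⟩ := hkey
      rw [if_pos ⟨rfl, rfl⟩, lookA_eq_none t _ _ hknotin]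
      have hrow : PySem.List.pyGetD g (a : Int) [] = g[a]'(by omega) :=
        PySem.List.pyGetD_eq_getElem g [] (Int.natCast_nonneg _) (by omega)
      have hstep : stepB g ((b : Int), (a : Int), c1, c2, c3) =
          g.set a ((g[a]'(by omega)).set b (c1, c2, c3)) := by
        unfold stepB
        rw [if_pos ⟨Int.natCast_nonneg _, show ((a : Int) < 20) by exact_mod_cast ha,
            Int.natCast_nonneg _, show ((b : Int) < 10) by exact_mod_cast hb⟩,
          PySem.List.pySetD_of_nonneg _ _ (Int.natCast_nonneg _),
          PySem.List.pySetD_of_nonneg _ _ (Int.natCast_nonneg _), hrow,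
          Int.toNat_natCast, Int.toNat_natCast]
      have hblen : b < (g[a]'(by omega)).length := by
        rw [hr _ (List.getElem_mem _)]; exact hb
      rw [hstep, Option.getD_none, Option.getD_some]
      simp only [List.getD_eq_getElem?_getD]
      rw [List.getElem?_set_self (by omega), Option.getD_some,
        List.getElem?_set_self hblen, Option.getD_some]
    · rw [if_neg hkey]
      have hcell : ((stepB g (j', i', c1, c2, c3)).getD a []).getD b zC =
          (g.getD a []).getD b zC := by
        unfold stepB
        dsimp only
        split
        · rename_i hc
          obtain ⟨hi0, hi20, hj0, hj10⟩ := hc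
          rw [PySem.List.pySetD_of_nonneg _ _ hi0, PySem.List.pySetD_of_nonneg _ _ hj0]
          by_cases hia : i'.toNat = a
          · have hia' : i' = (a : Int) := by omega
            have hjb : j'.toNat ≠ b := by
              intro hjb
              exact hkey ⟨by omega, hia'⟩
            simp only [List.getD_eq_getElem?_getD, hia', Int.toNat_natCast]
            rw [List.getElem?_set_self (by omega), Option.getD_some,
              List.getElem?_set_ne hjb]
            simp [PySem.List.pyGetD_eq_getElem g ([] : List (Int × Int × Int))
                (Int.natCast_nonneg a) (by omega),
              List.getElem?_eq_getElem (show a < g.length by omega)]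
          · simp only [List.getD_eq_getElem?_getD]
            rw [List.getElem?_set_ne hia]
        · rfl
      rw [hcell]

-- ===== VERDICT (by name: the statement is the Claim_ definition above) =====
theorem grid0_len : grid0.length = 20 := by decide

theorem grid0_rows : ∀ r ∈ grid0, r.length = 10 := by decide

theorem grid0_row (a : Nat) (ha : a < 20) : grid0.getD a [] = List.replicate 10 zC := by
  unfold grid0
  rw [List.getD_eq_getElem?_getD, List.getElem?_replicate_of_lt ha, Option.getD_some]

theorem create_grid_spec : Claim_equal_create_grid := by
  intro filled _ hpre
  unfold Spec_create_grid
  have hA : create_grid filled =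
      (PySem.List.pyRange 0 20 1).foldl
        (fun g i => (PySem.List.pyRange 0 ((PySem.List.pyGetD g i []).length : Int) 1).foldl
          (fun g2 j => stepA filled g2 i j) g) grid0 := by
    unfold create_grid stepA
    rw [grid0_eq]
    rfl
  have hB : create_grid_alt filled = filled.foldl stepB grid0 := by
    unfold create_grid_alt stepB
    rw [grid0_eq]
  have h20 : ∀ i ∈ PySem.List.pyRange 0 20 1, 0 ≤ i ∧ i.toNat < grid0.length := by
    intro i hi
    rw [PySem.List.mem_pyRange_one] at hi
    refine ⟨hi.1, ?_⟩
    rw [grid0_len]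
    omega
  obtain ⟨hBlen, hBrows⟩ := B_shape filled grid0 grid0_len grid0_rows
  rw [hA, hB, outer_eq filled _ grid0 h20]
  apply List.ext_getElem
  · rw [outer_len, hBlen, grid0_len]
  · intro a h1 h2
    have ha : a < 20 := by rwa [outer_len, grid0_len] at h1
    rw [← List.getD_eq_getElem (d := ([] : List (Int × Int × Int))),
      ← List.getD_eq_getElem (d := ([] : List (Int × Int × Int)))]
    rw [outer_cells filled _ (PySem.List.nodup_pyRange_one 0 20) grid0 h20 a
      (by rwa [grid0_len])]
    rw [if_pos (by rw [PySem.List.mem_pyRange_one]; omega)]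
    rw [grid0_row a ha]
    have hrlen : (List.replicate 10 zC).length = 10 := by decide
    rw [hrlen]
    simp only [Nat.cast_ofNat]
    -- both sides are rows of length 10; compare cell by cell
    apply List.ext_getElem
    · rw [row_len, hrlen]
      refine (hBrows _ ?_).symm
      rw [List.getD_eq_getElem _ _ (show a < (List.foldl stepB grid0 filled).length by
        rw [hBlen]; exact ha)]
      exact List.getElem_mem _
    · intro b hb1 hb2
      have hb : b < 10 := by rwa [row_len, hrlen] at hb1
      rw [← List.getD_eq_getElem (d := zC), ← List.getD_eq_getElem (d := zC)]
      rw [row_cells filled (a : Int) _ (PySem.List.nodup_pyRange_one 0 10)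
        (fun j hj => ((PySem.List.mem_pyRange_one).mp hj).1) _ b (by rwa [hrlen])]
      rw [if_pos (by rw [PySem.List.mem_pyRange_one]; omega)]
      rw [B_cells filled hpre grid0 grid0_len grid0_rows a b ha hb]
      rw [grid0_row a ha]
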